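-- pv_equiv track=rewrite | github.com/brockam6/assorted_candy | puzzles/longest_substring.py | find_sub
-- ===== SOURCE A (Python) =====
-- def find_sub(in_s: str):
--     unique = {}
--     count = 0
--     for c in in_s:
--         if not unique:
--             unique[c] = True
--             count += 1
--         elif c not in unique:
--             unique[c] = True
--             count += 1
--         else:
--             break
--     return count
-- ===== SOURCE B (Python) =====
-- def find_sub(in_s: str):
--     if not in_s:
--         return 0
--     head, rest = in_s[0], in_s[1:]
--     cut = rest.find(head)
--     trunc = rest if cut == -1 else rest[:cut]
--     return 1 + find_sub(trunc)
-- ===== Notes on version B (the rewrite author's own statement) =====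
-- stated objective: alternative
-- what changed: Replaces A's single left-to-right scan with a seen-characters dict by a divide-and-conquer recursion: the answer is 1 plus the answer on the tail truncated just before the next occurrence of the head character, with no seen-set maintained at all.
import Mathlib
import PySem

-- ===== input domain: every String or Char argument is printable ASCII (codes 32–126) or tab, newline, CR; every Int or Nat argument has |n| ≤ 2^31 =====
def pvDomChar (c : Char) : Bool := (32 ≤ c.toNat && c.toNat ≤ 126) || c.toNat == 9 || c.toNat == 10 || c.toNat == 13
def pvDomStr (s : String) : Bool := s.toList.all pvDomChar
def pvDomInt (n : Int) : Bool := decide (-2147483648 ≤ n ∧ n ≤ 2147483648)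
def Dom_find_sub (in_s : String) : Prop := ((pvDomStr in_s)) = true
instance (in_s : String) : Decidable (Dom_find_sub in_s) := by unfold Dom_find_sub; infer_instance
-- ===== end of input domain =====

-- B replaces A's seen-dict scan by a recursion with no seen-set: 1 + the answer on the tail
-- truncated just before the next occurrence of the head character (alternative; not faster).


-- ===== PORT A =====
-- loop state: the dict `unique` of seen characters and the running `count`; break returns count
def findSubGoA : List Char → PySem.Dict Char Bool → Int → Int
  | [], _, count => count
  | c :: rest, unique, count =>
    if unique.size = 0 then
      findSubGoA rest (unique.insert c true) (count + 1)
    else if unique.contains c = false then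
      findSubGoA rest (unique.insert c true) (count + 1)
    else
      count

def find_sub (in_s : String) : Int :=
  findSubGoA in_s.toList PySem.Dict.empty 0

-- ===== PORT B =====
-- `if not in_s: return 0; cut = rest.find(head); trunc = rest if cut == -1 else rest[:cut];
--  return 1 + find_sub(trunc)` — head/rest as the head and tail of the char list
def findSubB : List Char → Int
  | [] => 0
  | c :: rest =>
    if PySem.Chars.find rest [c] = -1 then
      1 + findSubB rest
    else
      1 + findSubB (PySem.List.slice rest none (some (PySem.Chars.find rest [c])))
termination_by l => l.length
decreasing_by
  · simp
  · rename_i h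
    have h0 : (0:Int) ≤ PySem.Chars.find rest [c] := by
      have := PySem.Chars.neg_one_le_find rest [c]; omega
    rw [PySem.List.slice_to _ h0]
    simp only [List.length_take, List.length_cons]
    omega

def find_sub_alt (in_s : String) : Int :=
  findSubB in_s.toList

-- ===== PRECONDITION & SPEC =====
def Spec_find_sub (in_s : String) (out : Int) : Prop := out = find_sub_alt in_s
instance (in_s : String) (out : Int) : Decidable (Spec_find_sub in_s out) := by unfold Spec_find_sub; infer_instance

-- ===== CLAIM (what is proved, stated in full; the proofs are below) =====
def Claim_equal_find_sub : Prop := ∀ (in_s : String), Dom_find_sub in_s → Spec_find_sub in_s (find_sub in_s)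

-- ===== LEMMAS AND PROOFS =====

-- proof-side spec: indexed prefix scan, returning the first index whose character repeats
def scanP (full : List Char) : List Char → Nat → Int
  | [], _ => (full.length : Int)
  | x :: rest, i => if (full.take i).contains x then (i : Int) else scanP full rest (i + 1)

lemma findSub_main : ∀ (rest p : List Char) (d : PySem.Dict Char Bool) (count : Int),
    (∀ c, d.contains c = p.contains c) → d.size = p.length → count = (p.length : Int) →
    findSubGoA rest d count = scanP (p ++ rest) rest p.length := by
  intro rest
  induction rest with
  | nil =>
    intro p d count _ _ hc
    simp [findSubGoA, scanP, hc]
  | cons c rest ih =>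
    intro p d count hcont hsz hc
    have htake : (p ++ c :: rest).take p.length = p := by
      simp
    by_cases hz : d.size = 0
    · have hp : p = [] := List.length_eq_zero_iff.mp (hsz ▸ hz)
      subst hp
      simp only [findSubGoA, scanP, hz, if_true, htake]
      simp only [List.contains_nil, Bool.false_eq_true, if_false]
      have := ih [c] (d.insert c true) (count + 1)
        (by intro c'
            rw [PySem.Dict.contains_insert, hcont c']
            by_cases h : c' = c <;> simp [h, List.contains_eq_mem])
        (by rw [PySem.Dict.size_insert]
            simp [hcont c, hz])
        (by simp [hc])
      simpa using this
    · have hne : d.size ≠ 0 := hz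
      by_cases hmem : c ∈ p
      · have : d.contains c = true := by rw [hcont]; simpa [List.contains_eq_mem]
        simp [findSubGoA, scanP, hne, this, htake, List.contains_eq_mem, hmem, hc]
      · have hcf : d.contains c = false := by
          rw [hcont]; simpa [List.contains_eq_mem]
        simp only [findSubGoA, scanP, hne, if_false, hcf, if_true, htake]
        simp only [List.contains_eq_mem, decide_eq_true_eq, hmem, if_false]
        have := ih (p ++ [c]) (d.insert c true) (count + 1)
          (by intro c'
              rw [PySem.Dict.contains_insert, hcont c']
              by_cases h : c' = c <;> simp [h, Ne.symm, List.contains_eq_mem])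
          (by rw [PySem.Dict.size_insert]; simp [hcf, hsz])
          (by simp [hc])
        simpa using this

-- single-character prefix of a drop names the element at that index
lemma singleton_prefix_drop {c : Char} {l : List Char} {k : Nat} :
    [c] <+: l.drop k ↔ ∃ h : k < l.length, l[k] = c := by
  constructor
  · rintro ⟨t, ht⟩
    have hk : k < l.length := by
      by_contra h
      rw [List.drop_eq_nil_of_le (by omega)] at ht
      simp at ht
    refine ⟨hk, ?_⟩
    have : (l.drop k)[0]'(by rw [← ht]; simp) = c := by simp [← ht]
    simpa using this
  · rintro ⟨h, hc⟩
    refine ⟨l.drop (k+1), ?_⟩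
    rw [List.singleton_append, ← hc, List.getElem_cons_drop]

-- the key step: scanning c :: rest from index 1 equals 1 + scanning the truncation t,
-- where t is the prefix of rest before the first occurrence of c (or all of rest)
lemma scan_step (c : Char) (rest t : List Char)
    (hpre : t <+: rest) (hnc : c ∉ t)
    (hend : t = rest ∨ ∃ h : t.length < rest.length, rest[t.length] = c) :
    ∀ (u : List Char) (j : Nat), rest.drop j = u → j ≤ t.length →
      scanP (c :: rest) u (j+1) = 1 + scanP t (t.drop j) j := by
  have htk : t = rest.take t.length := List.prefix_iff_eq_take.mp hpre
  intro u
  induction u with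
  | nil =>
    intro j hdrop hj
    have hjlen : rest.length ≤ j := by
      by_contra h
      have := List.drop_eq_nil_iff.mp hdrop
      omega
    have hteq : t = rest := by
      rcases hend with h | ⟨h, _⟩
      · exact h
      · have := hpre.length_le; omega
    have hj' : j = t.length := by
      have := hpre.length_le
      omega
    subst hteq
    subst hj'
    simp [scanP, List.drop_length]
    ring
  | cons x u' ih =>
    intro j hdrop hj
    have hjlt : j < rest.length := by
      by_contra h
      rw [List.drop_eq_nil_of_le (by omega)] at hdrop
      simp at hdrop
    have hxj : rest[j] = x := by
      have : (rest.drop j)[0]'(by rw [hdrop]; simp) = x := by simp [hdrop]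
      simpa using this
    have htakej : t.take j = rest.take j := by
      conv_lhs => rw [htk]
      rw [List.take_take]
      congr 1; omega
    by_cases hxc : x = c
    · -- hit the head character: j must be exactly t.length
      have hjt : j = t.length := by
        by_contra h
        have hjlt' : j < t.length := by omega
        have : t[j]'hjlt' = c := by
          rw [hpre.getElem hjlt']; simpa [hxc] using hxj
        exact hnc (this ▸ List.getElem_mem hjlt')
      subst hjt
      have : (( c :: rest).take (t.length+1)).contains x = true := by
        simp [List.contains_eq_mem, hxc]
      simp only [scanP, this, if_true]
      rw [List.drop_length]
      simp [scanP]
      ring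
    · have hjtl : j < t.length := by
        rcases Nat.lt_or_ge j t.length with h | h
        · exact h
        have hjt : j = t.length := by omega
        rcases hend with h' | ⟨h', hc'⟩
        · subst h'; omega
        · simp only [hjt] at hxj
          exact absurd (hxj.symm.trans hc') hxc
      have htj : t[j]'hjtl = x := by
        rw [hpre.getElem hjtl]; exact hxj
      have hdt : t.drop j = x :: t.drop (j+1) := by
        rw [← htj, List.getElem_cons_drop]
      by_cases hmem : x ∈ rest.take j
      · have h1 : ((c :: rest).take (j+1)).contains x = true := by
          simp [List.contains_eq_mem]; right; exact hmem
        have h2 : (t.take j).contains x = true := by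
          rw [htakej]; simp [List.contains_eq_mem, hmem]
        simp only [scanP, h1, if_true, hdt, h2]
        push_cast; ring
      · have h1 : ((c :: rest).take (j+1)).contains x = false := by
          simp [List.contains_eq_mem, hxc, hmem]
        have h2 : (t.take j).contains x = false := by
          rw [htakej]; simp [List.contains_eq_mem, hmem]
        simp only [scanP, h1, hdt, h2, Bool.false_eq_true, if_false]
        exact ih (j+1) (by rw [← List.drop_drop, hdrop]; simp) (by omega)

lemma mem_iff_singleton_infix (c : Char) (l : List Char) : [c] <:+: l ↔ c ∈ l := by
  constructor
  · intro h
    exact (List.infix_iff_prefix_suffix.mp h).elim (fun t ⟨ht, hts⟩ => by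
      have : c ∈ t := ht.subset (by simp)
      exact hts.subset this)
  · intro h
    rcases List.mem_iff_append.mp h with ⟨s, t, rfl⟩
    exact ⟨s, t, by simp⟩

lemma scan_eq_B (l : List Char) : scanP l l 0 = findSubB l := by
  match l with
  | [] => simp [scanP, findSubB]
  | c :: rest =>
    have hstep : scanP (c :: rest) (c :: rest) 0 = scanP (c :: rest) rest 1 := by
      simp [scanP]
    rw [hstep]
    by_cases hf : PySem.Chars.find rest [c] = -1
    · -- c does not occur in rest: trunc = rest
      have hnc : c ∉ rest := by
        have := PySem.Chars.find_eq_neg_one_iff rest [c] |>.mp hf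
        rw [mem_iff_singleton_infix] at this
        exact this
      have := scan_step c rest rest (List.prefix_refl rest) hnc (Or.inl rfl)
        rest 0 (by simp) (by simp)
      rw [List.drop_zero] at this
      rw [this, scan_eq_B rest]
      rw [findSubB]
      simp [hf]
    · -- c occurs at index k: trunc = rest.take k
      have h0 : (0:Int) ≤ PySem.Chars.find rest [c] := by
        have := PySem.Chars.neg_one_le_find rest [c]; omega
      obtain ⟨hocc, hfirst⟩ := PySem.Chars.find_spec h0
      set k := (PySem.Chars.find rest [c]).toNat with hk
      obtain ⟨hklt, hck⟩ := singleton_prefix_drop.mp hocc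
      have hncnt : c ∉ rest.take k := by
        intro hmem
        obtain ⟨i, hi, hgi⟩ := List.getElem_of_mem hmem
        have hik : i < k := by simp at hi; omega
        exact hfirst i hik (singleton_prefix_drop.mpr ⟨by omega, by simpa using hgi⟩)
      have hlen : (rest.take k).length = k := by simp; omega
      have := scan_step c rest (rest.take k) (List.take_prefix k rest) hncnt
        (Or.inr ⟨by omega, by simp [hlen]; exact hck⟩)
        rest 0 (by simp) (by simp)
      rw [List.drop_zero] at this
      rw [this, scan_eq_B (rest.take k)]
      rw [findSubB]
      simp only [hf, if_false]
      rw [PySem.List.slice_to _ h0]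
  termination_by l.length
  decreasing_by
    all_goals simp only [List.length_take, List.length_cons]
    all_goals omega

-- ===== VERDICT (by name: the statement is the Claim_ definition above) =====
theorem find_sub_spec : Claim_equal_find_sub := by
  intro s _
  unfold Spec_find_sub find_sub find_sub_alt
  have h := findSub_main s.toList [] PySem.Dict.empty 0
    (by intro c; simp [PySem.Dict.contains_empty]) (by simp [PySem.Dict.size_empty]) rfl
  simpa [scan_eq_B] using h
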